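-- pv_equiv track=rewrite | github.com/bpolania/CognOS | src/shell/main.py | _get_fallback_explanation
-- ===== SOURCE A (Python) =====
-- def _get_fallback_explanation(command: str) -> str:
--     """Provide fallback explanations for common commands."""
--     parts = command.strip().split()
--     if not parts:
--         return f"This will execute: {command}"
--
--     first_word = parts[0].lower()
--
--     # Extract actual filename/path from command, skipping flags
--     def get_target_file(parts, start_idx=1):
--         """Extract the actual filename from command parts, skipping flags."""
--         for i in range(start_idx, len(parts)):
--             if not parts[i].startswith('-'):
--                 return parts[i]
--         return None
--
--     if first_word == "touch":
--         target = get_target_file(parts)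
--         if target:
--             return f"This will create an empty file named '{target}'."
--         else:
--             return "This will create an empty file or update its timestamp."
--     elif first_word == "mkdir":
--         target = get_target_file(parts)
--         if target:
--             return f"This will create a new directory named '{target}'."
--         else:
--             return "This will create a new directory."
--     elif first_word == "rm":
--         target = get_target_file(parts)
--         if target:
--             if "-rf" in command or "-r" in command:
--                 return f"This will permanently delete '{target}' and all its contents."
--             else:
--                 return f"This will delete the file '{target}'."
--         else:
--             return "This will delete files or directories."
--     elif first_word == "cp":
--         # For cp, we need source and destination
--         source = get_target_file(parts)
--         if source and len(parts) >= 3: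
--             # Find destination (last non-flag argument)
--             dest = None
--             for i in range(len(parts) - 1, 0, -1):
--                 if not parts[i].startswith('-'):
--                     dest = parts[i]
--                     break
--             if dest and dest != source:
--                 return f"This will copy '{source}' to '{dest}'."
--         return "This will copy files or directories."
--     elif first_word == "mv":
--         # For mv, we need source and destination
--         source = get_target_file(parts)
--         if source and len(parts) >= 3:
--             # Find destination (last non-flag argument)
--             dest = None
--             for i in range(len(parts) - 1, 0, -1):
--                 if not parts[i].startswith('-'):
--                     dest = parts[i]
--                     break
--             if dest and dest != source:
--                 return f"This will move '{source}' to '{dest}'."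
--         return "This will move or rename files or directories."
--     elif first_word == "cat":
--         target = get_target_file(parts)
--         if target:
--             return f"This will display the contents of '{target}'."
--         else:
--             return "This will display the contents of a file."
--     elif first_word == "echo":
--         return "This will output text to the terminal."
--     elif first_word == "cd":
--         target = get_target_file(parts)
--         if target:
--             return f"This will change to the directory '{target}'."
--         else:
--             return "This will change the current directory."
--     elif first_word == "ls":
--         return "This will list files and directories."
--     elif first_word == "pwd":
--         return "This will show the current directory path."
--     else:
--         # Generic fallbacks for common commands
--         fallback_explanations = {
--             "touch": "This will create an empty file or update its timestamp.",
--             "mkdir": "This will create a new directory.",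
--             "rm": "This will delete files or directories.",
--             "cp": "This will copy files or directories.",
--             "mv": "This will move or rename files or directories.",
--             "ls": "This will list files and directories.",
--             "cat": "This will display the contents of a file.",
--             "echo": "This will output text to the terminal.",
--             "cd": "This will change the current directory.",
--             "pwd": "This will show the current directory path."
--         }
--
--         return fallback_explanations.get(first_word, f"This will execute: {command}")
-- ===== SOURCE B (Python) =====
-- # One fused pass over the arguments precomputes (count, first non-flag, last
-- # non-flag); a match statement then just formats — no per-branch scans and no
-- # unreachable fallback dict (A's last dict is never reached: every key has
-- # already been tested by the chain above it).
--
-- def _get_fallback_explanation(command: str) -> str: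
--     parts = command.strip().split()
--     if not parts:
--         return f"This will execute: {command}"
--     # single pass: argument count, first non-flag argument, last non-flag argument
--     n, target, dest = 1, None, None
--     for p in parts[1:]:
--         n += 1
--         if not p.startswith('-'):
--             if target is None:
--                 target = p
--             dest = p
--     match parts[0].lower():
--         case "touch":
--             return (f"This will create an empty file named '{target}'." if target is not None
--                     else "This will create an empty file or update its timestamp.")
--         case "mkdir":
--             return (f"This will create a new directory named '{target}'." if target is not None
--                     else "This will create a new directory.")
--         case "rm":
--             if target is None:
--                 return "This will delete files or directories."
--             if "-rf" in command or "-r" in command: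
--                 return f"This will permanently delete '{target}' and all its contents."
--             return f"This will delete the file '{target}'."
--         case "cp":
--             if target is not None and n >= 3 and dest != target:
--                 return f"This will copy '{target}' to '{dest}'."
--             return "This will copy files or directories."
--         case "mv":
--             if target is not None and n >= 3 and dest != target:
--                 return f"This will move '{target}' to '{dest}'."
--             return "This will move or rename files or directories."
--         case "cat":
--             return (f"This will display the contents of '{target}'." if target is not None
--                     else "This will display the contents of a file.")
--         case "echo":
--             return "This will output text to the terminal."
--         case "cd":
--             return (f"This will change to the directory '{target}'." if target is not None
--                     else "This will change the current directory.")
--         case "ls":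
--             return "This will list files and directories."
--         case "pwd":
--             return "This will show the current directory path."
--         case _:
--             return f"This will execute: {command}"
-- ===== Notes on version B (the rewrite author's own statement) =====
-- stated objective: simpler
-- what changed: Replaced A's per-branch forward and backward argument scans by one fused pass that precomputes (argument count, first non-flag, last non-flag) before a single match-based dispatch, and dropped A's unreachable final fallback dict.
import Mathlib
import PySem

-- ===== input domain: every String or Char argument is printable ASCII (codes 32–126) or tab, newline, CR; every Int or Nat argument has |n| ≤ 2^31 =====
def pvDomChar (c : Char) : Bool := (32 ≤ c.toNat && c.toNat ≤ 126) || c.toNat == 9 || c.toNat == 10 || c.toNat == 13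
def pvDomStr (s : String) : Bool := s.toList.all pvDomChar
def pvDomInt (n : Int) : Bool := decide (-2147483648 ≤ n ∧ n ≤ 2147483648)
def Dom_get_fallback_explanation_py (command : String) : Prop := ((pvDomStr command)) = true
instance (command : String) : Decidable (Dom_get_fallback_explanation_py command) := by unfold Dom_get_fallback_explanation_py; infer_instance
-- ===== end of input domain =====

-- One honest line: B replaces A's per-branch forward/backward argument scans by one
-- fused pass precomputing (count, first non-flag, last non-flag), and drops A's
-- unreachable final fallback dict (objective: simpler, same cost).

-- ===== PORT A =====

-- get_target_file(parts, start_idx): first parts[i] (i ≥ start_idx) not starting with '-'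
def pvGetTargetFile (parts : List String) (startIdx : Nat) : Option String :=
  (parts.drop startIdx).find? (fun p => !PySem.Str.startswith p "-")

def get_fallback_explanation_py (command : String) : String :=
  let parts := PySem.Str.split₀ (PySem.Str.strip command)
  match parts with
  | [] => "This will execute: " ++ command
  | p0 :: _rest =>
    let first_word := PySem.Str.lower p0
    if first_word = "touch" then
      match pvGetTargetFile parts 1 with
      | some target => "This will create an empty file named '" ++ target ++ "'."
      | none => "This will create an empty file or update its timestamp."
    else if first_word = "mkdir" then
      match pvGetTargetFile parts 1 with
      | some target => "This will create a new directory named '" ++ target ++ "'."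
      | none => "This will create a new directory."
    else if first_word = "rm" then
      match pvGetTargetFile parts 1 with
      | some target =>
        if PySem.Str.isIn "-rf" command || PySem.Str.isIn "-r" command then
          "This will permanently delete '" ++ target ++ "' and all its contents."
        else
          "This will delete the file '" ++ target ++ "'."
      | none => "This will delete files or directories."
    else if first_word = "cp" then
      match pvGetTargetFile parts 1 with
      | some source =>
        if parts.length ≥ 3 then
          -- backward scan: for i in range(len(parts)-1, 0, -1), first non-flag
          match (parts.drop 1).reverse.find? (fun p => !PySem.Str.startswith p "-") with
          | some dest =>
            if dest ≠ source then "This will copy '" ++ source ++ "' to '" ++ dest ++ "'."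
            else "This will copy files or directories."
          | none => "This will copy files or directories."
        else "This will copy files or directories."
      | none => "This will copy files or directories."
    else if first_word = "mv" then
      match pvGetTargetFile parts 1 with
      | some source =>
        if parts.length ≥ 3 then
          match (parts.drop 1).reverse.find? (fun p => !PySem.Str.startswith p "-") with
          | some dest =>
            if dest ≠ source then "This will move '" ++ source ++ "' to '" ++ dest ++ "'."
            else "This will move or rename files or directories."
          | none => "This will move or rename files or directories."
        else "This will move or rename files or directories."
      | none => "This will move or rename files or directories."
    else if first_word = "cat" then
      match pvGetTargetFile parts 1 with
      | some target => "This will display the contents of '" ++ target ++ "'."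
      | none => "This will display the contents of a file."
    else if first_word = "echo" then
      "This will output text to the terminal."
    else if first_word = "cd" then
      match pvGetTargetFile parts 1 with
      | some target => "This will change to the directory '" ++ target ++ "'."
      | none => "This will change the current directory."
    else if first_word = "ls" then
      "This will list files and directories."
    else if first_word = "pwd" then
      "This will show the current directory path."
    else
      (PySem.Dict.ofList
        [("touch", "This will create an empty file or update its timestamp."),
         ("mkdir", "This will create a new directory."),
         ("rm", "This will delete files or directories."),
         ("cp", "This will copy files or directories."),
         ("mv", "This will move or rename files or directories."),
         ("ls", "This will list files and directories."),
         ("cat", "This will display the contents of a file."),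
         ("echo", "This will output text to the terminal."),
         ("cd", "This will change the current directory."),
         ("pwd", "This will show the current directory path.")]).getD first_word
        ("This will execute: " ++ command)

-- ===== PORT B =====

-- one fused pass: (argument count so far, first non-flag, last non-flag)
def pvScanStep (s : Nat × Option String × Option String) (p : String) :
    Nat × Option String × Option String :=
  if !PySem.Str.startswith p "-" then
    (s.1 + 1, (if s.2.1.isNone then some p else s.2.1), some p)
  else
    (s.1 + 1, s.2.1, s.2.2)

def get_fallback_explanation_py_alt (command : String) : String :=
  let parts := PySem.Str.split₀ (PySem.Str.strip command)
  match parts with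
  | [] => "This will execute: " ++ command
  | p0 :: rest =>
    let st := rest.foldl pvScanStep (1, none, none)
    let n := st.1
    let target := st.2.1
    let dest := st.2.2
    match PySem.Str.lower p0 with
    | "touch" =>
      match target with
      | some t => "This will create an empty file named '" ++ t ++ "'."
      | none => "This will create an empty file or update its timestamp."
    | "mkdir" =>
      match target with
      | some t => "This will create a new directory named '" ++ t ++ "'."
      | none => "This will create a new directory."
    | "rm" =>
      match target with
      | none => "This will delete files or directories."
      | some t =>
        if PySem.Str.isIn "-rf" command || PySem.Str.isIn "-r" command then
          "This will permanently delete '" ++ t ++ "' and all its contents."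
        else
          "This will delete the file '" ++ t ++ "'."
    | "cp" =>
      match target with
      | some t =>
        if n ≥ 3 ∧ dest ≠ some t then
          "This will copy '" ++ t ++ "' to '" ++ dest.getD "" ++ "'."
        else "This will copy files or directories."
      | none => "This will copy files or directories."
    | "mv" =>
      match target with
      | some t =>
        if n ≥ 3 ∧ dest ≠ some t then
          "This will move '" ++ t ++ "' to '" ++ dest.getD "" ++ "'."
        else "This will move or rename files or directories."
      | none => "This will move or rename files or directories."
    | "cat" =>
      match target with
      | some t => "This will display the contents of '" ++ t ++ "'."
      | none => "This will display the contents of a file."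
    | "echo" => "This will output text to the terminal."
    | "cd" =>
      match target with
      | some t => "This will change to the directory '" ++ t ++ "'."
      | none => "This will change the current directory."
    | "ls" => "This will list files and directories."
    | "pwd" => "This will show the current directory path."
    | _ => "This will execute: " ++ command

-- ===== PRECONDITION & SPEC =====
def Spec_get_fallback_explanation_py (command : String) (out : String) : Prop := out = get_fallback_explanation_py_alt command
instance (command : String) (out : String) : Decidable (Spec_get_fallback_explanation_py command out) := by unfold Spec_get_fallback_explanation_py; infer_instance

-- ===== CLAIM (what is proved, stated in full; the proofs are below) =====
def Claim_equal_get_fallback_explanation_py : Prop := ∀ (command : String), Dom_get_fallback_explanation_py command → Spec_get_fallback_explanation_py command (get_fallback_explanation_py command)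

-- ===== LEMMAS AND PROOFS =====

-- the fused fold computes: count, first non-flag (`find?`), last non-flag (`reverse.find?`)
theorem pvScan_spec (l : List String) (n : Nat) (t d : Option String) :
    l.foldl pvScanStep (n, t, d) =
      (n + l.length,
       t.or (l.find? (fun p => !PySem.Str.startswith p "-")),
       ((l.reverse.find? (fun p => !PySem.Str.startswith p "-")).or d)) := by
  induction l generalizing n t d with
  | nil => simp
  | cons p l ih =>
    simp only [List.foldl_cons, pvScanStep, List.reverse_cons, List.find?_append,
      List.find?_cons, List.length_cons]
    by_cases hp : (!PySem.Str.startswith p "-") = true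
    · simp only [hp, ih]
      cases t <;> cases hl : l.reverse.find? (fun p => !PySem.Str.startswith p "-") <;>
        simp_all [Option.or] <;> omega
    · have hp' : (!PySem.Str.startswith p "-") = false := by simpa using hp
      simp only [hp', Bool.false_eq_true, if_false, ih]
      cases hl : l.reverse.find? (fun p => !PySem.Str.startswith p "-") <;>
        simp_all [Option.or] <;> omega

-- ===== VERDICT (by name: the statement is the Claim_ definition above) =====
set_option maxRecDepth 8192 in
theorem get_fallback_explanation_py_spec : Claim_equal_get_fallback_explanation_py := by
  intro command _
  unfold Spec_get_fallback_explanation_py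
  unfold get_fallback_explanation_py get_fallback_explanation_py_alt pvGetTargetFile
  cases h : PySem.Str.split₀ (PySem.Str.strip command) with
  | nil => rfl
  | cons p0 rest =>
    simp only [List.drop_succ_cons, List.drop_zero, List.length_cons, pvScan_spec,
      Option.none_or, Option.or_none]
    by_cases h1 : PySem.Str.lower p0 = "touch"
    · cases hf : List.find? (fun p => !PySem.Str.startswith p "-") rest <;> simp [hf, h1]
    by_cases h2 : PySem.Str.lower p0 = "mkdir"
    · cases hf : List.find? (fun p => !PySem.Str.startswith p "-") rest <;> simp [hf, h2]
    by_cases h3 : PySem.Str.lower p0 = "rm"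
    · cases hf : List.find? (fun p => !PySem.Str.startswith p "-") rest <;> simp [hf, h3]
    by_cases h4 : PySem.Str.lower p0 = "cp"
    · cases hf : List.find? (fun p => !PySem.Str.startswith p "-") rest with
      | none => simp [hf, h4]
      | some src =>
        cases hr : List.find? (fun p => !PySem.Str.startswith p "-") rest.reverse with
        | none =>
          exfalso
          have hpx : (!PySem.Str.startswith src "-") = true :=
            (List.find?_eq_some_iff_append.mp hf).1
          have hx : src ∈ rest := List.mem_of_find?_eq_some hf
          have hnone := List.find?_eq_none.mp hr src (by simpa using hx)
          exact hnone (by simpa using hpx)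
        | some dest =>
          by_cases hn : 2 ≤ rest.length
          · have hn' : 3 ≤ 1 + rest.length := by omega
            by_cases hd : dest = src <;> simp [hf, h4, hr, hn, hn', hd]
          · have hn' : ¬ 3 ≤ 1 + rest.length := by omega
            simp [hf, h4, hr, hn, hn']
    by_cases h5 : PySem.Str.lower p0 = "mv"
    · cases hf : List.find? (fun p => !PySem.Str.startswith p "-") rest with
      | none => simp [hf, h5]
      | some src =>
        cases hr : List.find? (fun p => !PySem.Str.startswith p "-") rest.reverse with
        | none =>
          exfalso
          have hpx : (!PySem.Str.startswith src "-") = true :=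
            (List.find?_eq_some_iff_append.mp hf).1
          have hx : src ∈ rest := List.mem_of_find?_eq_some hf
          have hnone := List.find?_eq_none.mp hr src (by simpa using hx)
          exact hnone (by simpa using hpx)
        | some dest =>
          by_cases hn : 2 ≤ rest.length
          · have hn' : 3 ≤ 1 + rest.length := by omega
            by_cases hd : dest = src <;> simp [hf, h5, hr, hn, hn', hd]
          · have hn' : ¬ 3 ≤ 1 + rest.length := by omega
            simp [hf, h5, hr, hn, hn']
    by_cases h6 : PySem.Str.lower p0 = "cat"
    · cases hf : List.find? (fun p => !PySem.Str.startswith p "-") rest <;> simp [hf, h6]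
    by_cases h7 : PySem.Str.lower p0 = "echo"
    · simp [h7]
    by_cases h8 : PySem.Str.lower p0 = "cd"
    · cases hf : List.find? (fun p => !PySem.Str.startswith p "-") rest <;> simp [hf, h8]
    by_cases h9 : PySem.Str.lower p0 = "ls"
    · simp [h9]
    by_cases h10 : PySem.Str.lower p0 = "pwd"
    · simp [h10]
    · have hd : (PySem.Dict.ofList
        [("touch", "This will create an empty file or update its timestamp."),
         ("mkdir", "This will create a new directory."),
         ("rm", "This will delete files or directories."),
         ("cp", "This will copy files or directories."),
         ("mv", "This will move or rename files or directories."),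
         ("ls", "This will list files and directories."),
         ("cat", "This will display the contents of a file."),
         ("echo", "This will output text to the terminal."),
         ("cd", "This will change the current directory."),
         ("pwd", "This will show the current directory path.")] : PySem.Dict String String) =
        { items := [("touch", "This will create an empty file or update its timestamp."),
         ("mkdir", "This will create a new directory."),
         ("rm", "This will delete files or directories."),
         ("cp", "This will copy files or directories."),
         ("mv", "This will move or rename files or directories."),
         ("ls", "This will list files and directories."),
         ("cat", "This will display the contents of a file."),
         ("echo", "This will output text to the terminal."),
         ("cd", "This will change the current directory."),
         ("pwd", "This will show the current directory path.")] } := by decide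
      simp [h1, h2, h3, h4, h5, h6, h7, h8, h9, h10, hd,
        PySem.Dict.getD, PySem.Dict.get?, List.find?_cons, beq_iff_eq,
        Ne.symm h1, Ne.symm h2, Ne.symm h3, Ne.symm h4, Ne.symm h5,
        Ne.symm h6, Ne.symm h7, Ne.symm h8, Ne.symm h9, Ne.symm h10]
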